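-- pv_equiv track=rewrite | github.com/zin1985/ai_news_blogger | src/post_to_blogger.py | trim_labels_to_fit
-- ===== SOURCE A (Python) =====
-- def trim_labels_to_fit(labels, max_total_length=200):
--     result = []
--     total = 0
--     for label in labels:
--         length = len(label.encode("utf-8"))
--         if total + length + 2 > max_total_length:  # +2 for separator margin
--             break
--         result.append(label)
--         total += length
--     return result
-- ===== SOURCE B (Python) =====
-- def trim_labels_to_fit(labels, max_total_length=200):
--     # Stage 1: cumulative byte totals (nondecreasing, since lengths are >= 0).
--     cums = []
--     total = 0
--     for label in labels:
--         total += len(label.encode("utf-8"))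
--         cums.append(total)
--     # Stage 2: binary-search the first cumulative total that breaks the budget;
--     # monotonicity makes the cutoff predicate "true...true false...false".
--     lo, hi = 0, len(cums)
--     while lo < hi:
--         mid = (lo + hi) // 2
--         if cums[mid] + 2 > max_total_length:
--             hi = mid
--         else:
--             lo = mid + 1
--     return labels[:lo]
-- ===== Notes on version B (the rewrite author's own statement) =====
-- stated objective: alternative
-- what changed: Instead of one accumulating loop with an early break, B builds the full prefix-sum table of byte lengths and then binary-searches (bisect-style) the monotone cumulative totals for the cutoff index, returning labels[:cutoff].
import Mathlib
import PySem

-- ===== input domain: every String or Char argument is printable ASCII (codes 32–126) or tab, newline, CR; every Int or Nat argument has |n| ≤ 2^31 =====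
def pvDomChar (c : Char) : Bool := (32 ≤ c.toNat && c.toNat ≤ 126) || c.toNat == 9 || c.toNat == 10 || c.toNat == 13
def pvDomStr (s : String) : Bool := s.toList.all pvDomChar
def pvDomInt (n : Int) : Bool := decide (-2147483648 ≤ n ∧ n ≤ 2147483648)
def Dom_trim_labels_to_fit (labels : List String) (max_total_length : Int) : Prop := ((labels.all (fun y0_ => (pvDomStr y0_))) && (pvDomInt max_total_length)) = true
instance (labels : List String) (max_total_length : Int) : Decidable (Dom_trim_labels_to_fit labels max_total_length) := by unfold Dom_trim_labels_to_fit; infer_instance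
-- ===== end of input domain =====

-- B replaces A's accumulating loop with early break by a staged prefix-sum table
-- plus a binary search for the cutoff index (objective: alternative algorithm).
-- On the ASCII Dom, len(label.encode("utf-8")) = PySem.Str.len label (exact there).

-- ===== PORT A =====
-- the for-loop of A: carries `result` and `total` exactly as the Python does
def trimLoopA (max_total_length : Int) : List String → List String → Int → List String
  | [], result, _ => result
  | label :: rest, result, total =>
    let length : Int := PySem.Str.len label
    if total + length + 2 > max_total_length then result
    else trimLoopA max_total_length rest (result ++ [label]) (total + length)

def trim_labels_to_fit (labels : List String) (max_total_length : Int) : List String :=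
  trimLoopA max_total_length labels [] 0

-- ===== PORT B =====
-- stage 1 of Source B: the loop building the cumulative byte totals `cums`
def buildCums (total : Int) : List String → List Int
  | [] => []
  | label :: rest => (total + PySem.Str.len label) :: buildCums (total + PySem.Str.len label) rest

-- stage 2 of Source B: the `while lo < hi` binary-search loop; cums[mid] is in range
-- because lo ≤ mid < hi ≤ len(cums), so `getD … 0` is exact for Python's cums[mid]
def bisectLoop (cums : List Int) (max_total_length : Int) (lo hi : Nat) : Nat :=
  if _h : lo < hi then
    let mid := (lo + hi) / 2
    if cums.getD mid 0 + 2 > max_total_length then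
      bisectLoop cums max_total_length lo mid
    else
      bisectLoop cums max_total_length (mid + 1) hi
  else lo
  termination_by hi - lo
  decreasing_by all_goals omega

-- labels[:lo] with 0 ≤ lo ≤ len(labels) is exactly List.take lo
def trim_labels_to_fit_alt (labels : List String) (max_total_length : Int) : List String :=
  let cums := buildCums 0 labels
  labels.take (bisectLoop cums max_total_length 0 cums.length)

-- ===== PRECONDITION & SPEC =====
def Spec_trim_labels_to_fit (labels : List String) (max_total_length : Int) (out : List String) : Prop := out = trim_labels_to_fit_alt labels max_total_length
instance (labels : List String) (max_total_length : Int) (out : List String) : Decidable (Spec_trim_labels_to_fit labels max_total_length out) := by unfold Spec_trim_labels_to_fit; infer_instance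

-- ===== CLAIM (what is proved, stated in full; the proofs are below) =====
def Claim_equal_trim_labels_to_fit : Prop := ∀ (labels : List String) (max_total_length : Int), Dom_trim_labels_to_fit labels max_total_length → Spec_trim_labels_to_fit labels max_total_length (trim_labels_to_fit labels max_total_length)

-- ===== LEMMAS AND PROOFS =====

-- k m cums := the length of the valid prefix of the cumulative table
def trimCut (m : Int) (cums : List Int) : Nat :=
  (cums.takeWhile (fun c => decide (c + 2 ≤ m))).length

theorem buildCums_mono (ls : List String) (t : Int) :
    (buildCums t ls).Pairwise (· ≤ ·) ∧ ∀ x ∈ buildCums t ls, t ≤ x := by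
  induction ls generalizing t with
  | nil => exact ⟨List.Pairwise.nil, by simp [buildCums]⟩
  | cons l rest ih =>
    have hlen : (0:Int) ≤ PySem.Str.len l := by
      simp [PySem.Str.len_eq]
    obtain ⟨hs, hb⟩ := ih (t + PySem.Str.len l)
    refine ⟨List.pairwise_cons.2 ⟨fun x hx => ?_, hs⟩, ?_⟩
    · have := hb x hx; omega
    · intro x hx
      rcases List.mem_cons.1 hx with h | h
      · omega
      · have := hb x h; omega

-- A's loop computes the prefix of labels matched by the valid prefix of cums
theorem trimLoopA_take (m : Int) :
    ∀ (ls : List String) (result : List String) (t : Int),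
      trimLoopA m ls result t = result ++ ls.take (trimCut m (buildCums t ls)) := by
  intro ls
  induction ls with
  | nil => intro result t; simp [trimLoopA, buildCums, trimCut]
  | cons l rest ih =>
    intro result t
    simp only [trimLoopA, buildCums, trimCut, List.takeWhile, PySem.Str.len_eq,
      String.length_toList]
    by_cases h : t + (l.length : Int) + 2 > m
    · rw [if_pos h]
      have hd : decide (t + (l.length : Int) + 2 ≤ m) = false := by simp; omega
      simp [hd]
    · rw [if_neg h]
      have hd : decide (t + (l.length : Int) + 2 ≤ m) = true := by simp; omega
      simp only [hd, List.length_cons, List.take_succ_cons]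
      rw [ih]
      simp [trimCut]

-- in a nondecreasing table the cutoff predicate characterises indices < trimCut
theorem trimCut_char (m : Int) (cs : List Int) (hs : cs.Pairwise (· ≤ ·)) :
    ∀ i, i < cs.length → (cs.getD i 0 + 2 ≤ m ↔ i < trimCut m cs) := by
  induction cs with
  | nil => intro i hi; simp at hi
  | cons c rest ih =>
    obtain ⟨hc, hs'⟩ := List.pairwise_cons.1 hs
    intro i hi
    by_cases h : c + 2 ≤ m
    · have ht : decide (c + 2 ≤ m) = true := by simpa using h
      cases i with
      | zero =>
        simp [trimCut, List.takeWhile, h]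
      | succ j =>
        have hj : j < rest.length := by simpa using hi
        have := ih hs' j hj
        simp only [trimCut, List.takeWhile, ht, List.length_cons, List.getD_cons_succ]
        constructor
        · intro hp; exact Nat.succ_lt_succ ((this.1) hp)
        · intro hp; exact (this.2) (Nat.lt_of_succ_lt_succ hp)
    · have ht : decide (c + 2 ≤ m) = false := by simpa using h
      have hcut : trimCut m (c :: rest) = 0 := by simp [trimCut, List.takeWhile, ht]
      rw [hcut]
      simp only [Nat.not_lt_zero, iff_false]
      cases i with
      | zero => simpa using h
      | succ j =>
        have hj : j < rest.length := by simpa using hi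
        have hmem : rest.getD j 0 ∈ rest := by
          rw [List.getD_eq_getElem _ _ hj]; exact List.getElem_mem hj
        have := hc _ hmem
        simp only [List.getD_cons_succ]
        omega

-- the binary search converges to trimCut when the invariant lo ≤ k ≤ hi holds
theorem bisectLoop_eq (cs : List Int) (m : Int)
    (hchar : ∀ i, i < cs.length → (cs.getD i 0 + 2 ≤ m ↔ i < trimCut m cs)) :
    ∀ lo hi, lo ≤ trimCut m cs → trimCut m cs ≤ hi → hi ≤ cs.length →
      bisectLoop cs m lo hi = trimCut m cs := by
  intro lo hi
  induction hn : hi - lo using Nat.strong_induction_on generalizing lo hi with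
  | _ n ih =>
    intro hlo hhi hlen
    rw [bisectLoop]
    by_cases h : lo < hi
    · rw [dif_pos h]
      have hmid : (lo + hi) / 2 < cs.length := by omega
      have hch := hchar ((lo + hi) / 2) hmid
      by_cases hp : cs.getD ((lo + hi) / 2) 0 + 2 > m
      · rw [if_pos hp]
        have hk : trimCut m cs ≤ (lo + hi) / 2 := by
          by_contra hx
          have := hch.2 (by omega)
          omega
        exact ih ((lo + hi) / 2 - lo) (by omega) lo _ (by omega) hlo hk (by omega)
      · rw [if_neg hp]
        have hk : (lo + hi) / 2 < trimCut m cs := hch.1 (by omega)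
        exact ih (hi - ((lo + hi) / 2 + 1)) (by omega) _ hi (by omega) hk hhi hlen
    · rw [dif_neg h]; omega

-- ===== VERDICT (by name: the statement is the Claim_ definition above) =====
theorem trim_labels_to_fit_spec : Claim_equal_trim_labels_to_fit := by
  intro labels m _
  unfold Spec_trim_labels_to_fit trim_labels_to_fit trim_labels_to_fit_alt
  obtain ⟨hs, -⟩ := buildCums_mono labels 0
  have hk : trimCut m (buildCums 0 labels) ≤ (buildCums 0 labels).length :=
    (List.takeWhile_sublist _).length_le
  show trimLoopA m labels [] 0 =
    List.take (bisectLoop (buildCums 0 labels) m 0 (buildCums 0 labels).length) labels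
  rw [trimLoopA_take,
    bisectLoop_eq (buildCums 0 labels) m (trimCut_char m _ hs) 0 _ (Nat.zero_le _) hk le_rfl]
  simp
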